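-- pv_equiv track=rewrite | github.com/landgrafjacob/AdventOfCode2021 | day15/day15.py | extend_risk_list
-- ===== SOURCE A (Python) =====
-- def extend_risk_list(risk_list):
--   original_height = len(risk_list)
--
--   # Create the extended list variable
--   extended_list = []
--
--   # Loop through rows of original array
--   for line in risk_list:
--     # Start with original row
--     new_row = line.copy()
--
--     # Add on the same row with the entries incremented by 1,2,3,4, respectively.
--     for i in range(4):
--       new_row.extend([(risk + i) % 9 + 1 for risk in line])
--
--     # Add the long row to the extended array
--     extended_list.append(new_row)
--
--   # Loop through the extended rows
--   for i in range(4):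
--     # Make a new row where the entries have been incremented by 1,2,3, and 4
--     for line_num in range(original_height):
--       extended_list.append([(risk + i) % 9 + 1 for risk in extended_list[line_num]])
--
--   return extended_list
-- ===== SOURCE B (Python) =====
-- def extend_risk_list(risk_list):
--   # Compute every tile directly from the original grid: cell value for tile
--   # (tr, tc) is the seed value shifted by tr + tc with wraparound 1..9
--   # (the (0,0) tile is the original grid, kept as-is).
--   extended_list = []
--   for tr in range(5):
--     for row in risk_list:
--       new_row = []
--       for tc in range(5):
--         if tr == 0 and tc == 0:
--           new_row.extend(row)
--         else:
--           new_row.extend([(v + tr + tc - 1) % 9 + 1 for v in row])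
--       extended_list.append(new_row)
--   return extended_list
-- ===== Notes on version B (the rewrite author's own statement) =====
-- stated objective: alternative
-- what changed: A builds the grid incrementally, deriving each lower tile band by re-reading rows it already appended to the output; B computes every cell directly from the untouched input via the closed-form offset (v + tr + tc - 1) % 9 + 1 per tile (tr, tc), never reading the partially-built output.
import Mathlib
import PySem

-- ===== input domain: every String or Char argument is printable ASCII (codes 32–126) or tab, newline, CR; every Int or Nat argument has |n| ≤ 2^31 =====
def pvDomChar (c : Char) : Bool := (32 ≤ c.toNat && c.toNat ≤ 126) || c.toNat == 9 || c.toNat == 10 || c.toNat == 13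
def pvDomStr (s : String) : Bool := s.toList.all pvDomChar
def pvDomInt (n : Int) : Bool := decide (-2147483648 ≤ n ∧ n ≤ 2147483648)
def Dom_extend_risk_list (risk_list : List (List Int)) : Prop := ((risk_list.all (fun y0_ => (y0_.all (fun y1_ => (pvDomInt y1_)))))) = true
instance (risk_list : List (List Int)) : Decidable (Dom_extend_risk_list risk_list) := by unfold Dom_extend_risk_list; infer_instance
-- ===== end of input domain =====

-- B computes every cell of the 5x5-tiled grid directly from the untouched input via a
-- per-tile offset, instead of A's incremental re-reading of rows it already appended.

-- ===== PORT A =====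
def extend_risk_list (risk_list : List (List Int)) : List (List Int) :=
  let original_height : Int := risk_list.length
  let extended_list : List (List Int) :=
    risk_list.foldl (fun extended_list line =>
      let new_row := (PySem.List.pyRange 0 4 1).foldl
        (fun new_row i => new_row ++ line.map (fun risk => PySem.Int.mod (risk + i) 9 + 1)) line
      extended_list ++ [new_row]) []
  (PySem.List.pyRange 0 4 1).foldl (fun acc i =>
    (PySem.List.pyRange 0 original_height 1).foldl (fun acc line_num =>
      acc ++ [((PySem.List.pyGet? acc line_num).getD []).map
        (fun risk => PySem.Int.mod (risk + i) 9 + 1)]) acc) extended_list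
-- ===== PORT B =====
def extend_risk_list_alt (risk_list : List (List Int)) : List (List Int) :=
  (PySem.List.pyRange 0 5 1).foldl (fun extended_list tr =>
    risk_list.foldl (fun extended_list row =>
      let new_row := (PySem.List.pyRange 0 5 1).foldl (fun new_row tc =>
        if tr = 0 ∧ tc = 0 then new_row ++ row
        else new_row ++ row.map (fun v => PySem.Int.mod (v + tr + tc - 1) 9 + 1)) []
      extended_list ++ [new_row]) extended_list) []

-- ===== PRECONDITION & SPEC =====
def Spec_extend_risk_list (risk_list : List (List Int)) (out : List (List Int)) : Prop := out = extend_risk_list_alt risk_list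
instance (risk_list : List (List Int)) (out : List (List Int)) : Decidable (Spec_extend_risk_list risk_list out) := by unfold Spec_extend_risk_list; infer_instance

-- ===== CLAIM (what is proved, stated in full; the proofs are below) =====
def Claim_equal_extend_risk_list : Prop := ∀ (risk_list : List (List Int)), Dom_extend_risk_list risk_list → Spec_extend_risk_list risk_list (extend_risk_list risk_list)

-- ===== LEMMAS AND PROOFS =====

-- pvG i = one incremented copy of a row; pvW = A's widened row (the top band)
def pvG (i : Int) (l : List Int) : List Int := l.map (fun v => PySem.Int.mod (v + i) 9 + 1)
def pvW (l : List Int) : List Int := l ++ pvG 0 l ++ pvG 1 l ++ pvG 2 l ++ pvG 3 l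
def pvWB (tr : Int) (row : List Int) : List Int :=
  (PySem.List.pyRange 0 5 1).foldl (fun new_row tc =>
    if tr = 0 ∧ tc = 0 then new_row ++ row
    else new_row ++ row.map (fun v => PySem.Int.mod (v + tr + tc - 1) 9 + 1)) []
lemma mod9 (a : Int) : PySem.Int.mod a 9 = a % 9 := PySem.Int.mod_eq_emod_of_pos (by norm_num)
lemma pyRange5 : PySem.List.pyRange 0 5 1 = [0, 1, 2, 3, 4] := by decide
lemma WB0 (row : List Int) : pvWB 0 row = pvW row := by
  simp only [pvWB, pvW, pvG, pyRange5, List.foldl_cons, List.foldl_nil, List.nil_append,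
    List.map_append, List.map_map, mod9]
  norm_num
  repeat' apply congrArg₂ (· ++ ·)
  all_goals first
    | rfl
    | (apply List.map_congr_left; intro v _; (try simp only [Function.comp_apply]); omega)
lemma WBs (tr : Int) (htr : tr = 1 ∨ tr = 2 ∨ tr = 3 ∨ tr = 4) (row : List Int) :
    pvWB tr row = pvG (tr - 1) (pvW row) := by
  obtain rfl | rfl | rfl | rfl := htr <;>
  · simp only [pvWB, pvW, pvG, pyRange5, List.foldl_cons, List.foldl_nil, List.nil_append,
      List.map_append, List.map_map, mod9]
    norm_num
    repeat' apply congrArg₂ (· ++ ·)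
    all_goals first
      | rfl
      | (apply List.map_congr_left; intro v _; (try simp only [Function.comp_apply]); omega)

lemma pyRange4 : PySem.List.pyRange 0 4 1 = [0, 1, 2, 3] := by decide
lemma phaseA1 (rl : List (List Int)) :
    rl.foldl (fun extended_list line =>
      let new_row := (PySem.List.pyRange 0 4 1).foldl
        (fun new_row i => new_row ++ line.map (fun risk => PySem.Int.mod (risk + i) 9 + 1)) line
      extended_list ++ [new_row]) [] = rl.map pvW := by
  rw [show (rl.map pvW) = [] ++ rl.map pvW from rfl,
    ← PySem.List.foldl_append_singleton_eq_map]
  simp only [pyRange4, List.foldl_cons, List.foldl_nil, pvW, pvG, List.append_assoc]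
lemma phase2_go (f : Int → Int) (E acc : List (List Int)) (hpre : E <+: acc)
    (k : Nat) (hk : k ≤ E.length) :
    (PySem.List.pyRange 0 (k : Int) 1).foldl
      (fun acc ln => acc ++ [((PySem.List.pyGet? acc ln).getD []).map f]) acc
    = acc ++ (E.take k).map (List.map f) := by
  induction k with
  | zero => simp [PySem.List.pyRange_one_eq_nil (by norm_num : (0:Int) ≤ 0)]
  | succ k ih =>
    have hklt : k < E.length := hk
    have hcast : (((k + 1 : Nat)) : Int) = (k : Int) + 1 := by push_cast; ring
    rw [hcast, PySem.List.pyRange_one_succ_right (by positivity), List.foldl_append,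
      ih (Nat.le_of_succ_le hk)]
    obtain ⟨t, rfl⟩ := hpre
    have hget : PySem.List.pyGet? (E ++ t ++ (E.take k).map (List.map f)) (k : Int)
        = some E[k] := by
      rw [PySem.List.pyGet?_natCast, List.append_assoc,
        List.getElem?_append_left hklt, List.getElem?_eq_getElem hklt]
    simp only [List.foldl_cons, List.foldl_nil, hget, Option.getD_some]
    rw [List.take_add_one, List.getElem?_eq_getElem hklt]
    simp only [Option.toList_some, List.map_append, List.map_take, List.map_cons, List.map_nil,
      List.append_assoc]
lemma phaseA2_one (f : Int → Int) (E acc : List (List Int)) (hpre : E <+: acc) :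
    (PySem.List.pyRange 0 (E.length : Int) 1).foldl
      (fun acc ln => acc ++ [((PySem.List.pyGet? acc ln).getD []).map f]) acc
    = acc ++ E.map (List.map f) := by
  simpa using phase2_go f E acc hpre E.length le_rfl

lemma A_eq (rl : List (List Int)) :
    extend_risk_list rl
      = rl.map pvW ++ (rl.map pvW).map (List.map (fun v => PySem.Int.mod (v + 0) 9 + 1))
          ++ (rl.map pvW).map (List.map (fun v => PySem.Int.mod (v + 1) 9 + 1))
          ++ (rl.map pvW).map (List.map (fun v => PySem.Int.mod (v + 2) 9 + 1))
          ++ (rl.map pvW).map (List.map (fun v => PySem.Int.mod (v + 3) 9 + 1)) := by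
  unfold extend_risk_list
  simp only [phaseA1]
  have hlen : (rl.length : Int) = ((rl.map pvW).length : Int) := by simp
  rw [hlen, pyRange4]
  set E := rl.map pvW with hE
  simp only [List.foldl_cons, List.foldl_nil]
  rw [phaseA2_one _ E E (List.prefix_refl E),
    phaseA2_one _ E _ (List.prefix_append E _),
    phaseA2_one _ E _ ((List.prefix_append E _).trans (List.prefix_append _ _)),
    phaseA2_one _ E _ (((List.prefix_append E _).trans (List.prefix_append _ _)).trans
      (List.prefix_append _ _))]
lemma B_eq (rl : List (List Int)) :
    extend_risk_list_alt rl
      = rl.map (pvWB 0) ++ rl.map (pvWB 1) ++ rl.map (pvWB 2)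
          ++ rl.map (pvWB 3) ++ rl.map (pvWB 4) := by
  unfold extend_risk_list_alt
  rw [pyRange5]
  simp only [List.foldl_cons, List.foldl_nil]
  rw [PySem.List.foldl_append_singleton_eq_map, PySem.List.foldl_append_singleton_eq_map,
    PySem.List.foldl_append_singleton_eq_map, PySem.List.foldl_append_singleton_eq_map,
    PySem.List.foldl_append_singleton_eq_map]
  simp only [List.nil_append]
  rfl

-- ===== VERDICT (by name: the statement is the Claim_ definition above) =====
theorem extend_risk_list_spec : Claim_equal_extend_risk_list := by
  intro rl _
  unfold Spec_extend_risk_list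

  rw [A_eq, B_eq,
    List.map_congr_left (fun r (_ : r ∈ rl) => WB0 r),
    List.map_congr_left (fun r (_ : r ∈ rl) => WBs 1 (by norm_num) r),
    List.map_congr_left (fun r (_ : r ∈ rl) => WBs 2 (by norm_num) r),
    List.map_congr_left (fun r (_ : r ∈ rl) => WBs 3 (by norm_num) r),
    List.map_congr_left (fun r (_ : r ∈ rl) => WBs 4 (by norm_num) r)]
  simp only [pvG, List.map_map, Function.comp_def]
  norm_num
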